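-- pv_equiv track=rewrite | github.com/songjung-good/algorithm | SWEA/D2/16891. 베이비진 게임/babygin.py | check_babygin
-- ===== SOURCE A (Python) =====
-- def check_babygin(lst):
--     # 같은 수 3개
--     cnt = 0
--     for i in lst:
--         if i == 3:
--             return 'Y'
--         elif i >= 1:
--             cnt += 1
--         else:
--             cnt = 0
--         if cnt == 3:
--             return 'Y'
--     return 'N'
-- ===== SOURCE B (Python) =====
-- def check_babygin(lst):
--     # two stateless checks: an exact count of 3, or three consecutive non-zero counts
--     if any(c == 3 for c in lst):
--         return 'Y'
--     if any(a >= 1 and b >= 1 and c >= 1 for a, b, c in zip(lst, lst[1:], lst[2:])):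
--         return 'Y'
--     return 'N'
-- ===== Notes on version B (the rewrite author's own statement) =====
-- stated objective: alternative
-- what changed: Replaced A's single pass with a zero-resetting run counter by two stateless checks: membership of an exact count 3, and a sliding-window test over zipped triples for three consecutive non-zero counts.
import Mathlib
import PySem

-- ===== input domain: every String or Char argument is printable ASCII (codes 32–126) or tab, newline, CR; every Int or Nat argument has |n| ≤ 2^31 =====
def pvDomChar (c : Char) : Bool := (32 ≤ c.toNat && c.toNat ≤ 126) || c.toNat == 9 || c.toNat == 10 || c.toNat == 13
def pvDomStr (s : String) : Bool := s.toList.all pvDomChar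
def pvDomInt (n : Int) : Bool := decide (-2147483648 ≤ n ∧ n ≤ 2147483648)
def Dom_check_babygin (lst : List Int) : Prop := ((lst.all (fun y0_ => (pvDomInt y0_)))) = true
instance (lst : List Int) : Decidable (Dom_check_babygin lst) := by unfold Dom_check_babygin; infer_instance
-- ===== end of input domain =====

-- B is an alternative decomposition (two stateless checks instead of one accumulator pass); return values proved equal on all inputs.

-- ===== PORT A =====
-- A's loop over lst carrying the running counter cnt (reset when the count is not ≥ 1).
def checkLoopA : List Int → Int → String
  | [], _ => "N"
  | i :: rest, cnt =>
    if i = 3 then "Y"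
    else
      let cnt' := if i ≥ 1 then cnt + 1 else 0
      if cnt' = 3 then "Y" else checkLoopA rest cnt'

def check_babygin (lst : List Int) : String := checkLoopA lst 0

-- ===== PORT B =====
-- 'any(c == 3 …)', then 'any(… for a, b, c in zip(lst, lst[1:], lst[2:]))' (triples as nested pairs)
def check_babygin_alt (lst : List Int) : String :=
  if lst.any (fun c => c = 3) then "Y"
  else if ((lst.zip (PySem.List.slice lst (some 1) none)).zip
            (PySem.List.slice lst (some 2) none)).any
          (fun t => t.1.1 ≥ 1 && t.1.2 ≥ 1 && t.2 ≥ 1) then "Y"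
  else "N"

-- ===== PRECONDITION & SPEC =====
def Spec_check_babygin (lst : List Int) (out : String) : Prop := out = check_babygin_alt lst
instance (lst : List Int) (out : String) : Decidable (Spec_check_babygin lst out) := by unfold Spec_check_babygin; infer_instance

-- ===== CLAIM (what is proved, stated in full; the proofs are below) =====
def Claim_equal_check_babygin : Prop := ∀ (lst : List Int), Dom_check_babygin lst → Spec_check_babygin lst (check_babygin lst)

-- ===== LEMMAS AND PROOFS =====

-- B's window test in recursive form
def winB : List Int → Bool
  | a :: b :: c :: r => (a ≥ 1 && b ≥ 1 && c ≥ 1) || winB (b :: c :: r)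
  | _ => false

-- A's loop with the strings stripped off (true ↔ "Y")
def loopB : List Int → Int → Bool
  | [], _ => false
  | i :: rest, cnt =>
    if i = 3 then true
    else
      let cnt' := if i ≥ 1 then cnt + 1 else 0
      if cnt' = 3 then true else loopB rest cnt'

-- "the first k elements exist and are all ≥ 1"
def pre : Nat → List Int → Bool
  | 0, _ => true
  | _ + 1, [] => false
  | k + 1, a :: r => (a ≥ 1 : Bool) && pre k r

theorem checkLoopA_eq_loopB (lst : List Int) (cnt : Int) :
    checkLoopA lst cnt = if loopB lst cnt then "Y" else "N" := by
  induction lst generalizing cnt with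
  | nil => rfl
  | cons a r ih =>
    simp only [checkLoopA, loopB]
    split_ifs <;> simp_all

theorem zipAny_drop (f : (Int × Int) × Int → Bool)
    (hf : ∀ t, f t = (t.1.1 ≥ 1 && t.1.2 ≥ 1 && t.2 ≥ 1)) :
    ∀ lst : List Int, ((lst.zip (lst.drop 1)).zip (lst.drop 2)).any f = winB lst
  | [] => rfl
  | [a] => rfl
  | [a, b] => rfl
  | a :: b :: c :: r => by
    have ih := zipAny_drop f hf (b :: c :: r)
    simp only [List.drop, List.zip_cons_cons, List.any_cons, winB, hf] at ih ⊢
    rw [ih]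

theorem zipAny_eq_winB (lst : List Int) :
    ((lst.zip (PySem.List.slice lst (some 1) none)).zip
      (PySem.List.slice lst (some 2) none)).any
      (fun t => t.1.1 ≥ 1 && t.1.2 ≥ 1 && t.2 ≥ 1) = winB lst := by
  have h1 : PySem.List.slice lst (some 1) none = lst.drop 1 := by simp [pysem]
  have h2 : PySem.List.slice lst (some 2) none = lst.drop 2 := by simp [pysem]
  rw [h1, h2]
  exact zipAny_drop _ (fun t => rfl) lst

theorem winB_cons_pos (a : Int) (r : List Int) (ha : 1 ≤ a) :
    winB (a :: r) = (pre 2 r || winB r) := by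
  match r with
  | [] => simp [winB, pre]
  | [b] => simp [winB, pre]
  | b :: c :: s => simp [winB, pre, ha, Bool.or_comm]

theorem winB_cons_neg (a : Int) (r : List Int) (ha : ¬ 1 ≤ a) :
    winB (a :: r) = winB r := by
  match r with
  | [] => simp [winB]
  | [b] => simp [winB]
  | b :: c :: s => simp [winB, ha]

theorem pre_two_one (r : List Int) (h : pre 2 r = true) : pre 1 r = true := by
  match r with
  | [] => simp [pre] at h
  | b :: s => simp [pre] at h ⊢; exact h.1

theorem pre_three_winB (r : List Int) (h : pre 3 r = true) : winB r = true := by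
  match r with
  | [] => simp [pre] at h
  | [a] => simp [pre] at h
  | [a, b] => simp [pre] at h
  | a :: b :: c :: s => simp [pre] at h; simp [winB, h.1, h.2.1, h.2.2]

-- the loop invariant: A's loop (as a Bool) is the stateless disjunction, where a carried
-- count of cnt shortens the required leading run to 3 - cnt
theorem loop_char (lst : List Int) (cnt : Int) (hc : cnt = 0 ∨ cnt = 1 ∨ cnt = 2) :
    loopB lst cnt = (lst.any (fun c => c = 3) || winB lst || pre (3 - cnt).toNat lst) := by
  induction lst generalizing cnt with
  | nil =>
    rcases hc with h | h | h <;> subst h <;> rfl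
  | cons a r ih =>
    by_cases ha3 : a = 3
    · subst ha3; simp [loopB]
    · have hany : (a :: r).any (fun c => c = 3) = r.any (fun c => c = 3) := by
        simp [ha3]
      by_cases ha1 : 1 ≤ a
      · have hd : decide (1 ≤ a) = true := by simp [ha1]
        rcases hc with h | h | h <;> subst h
        · have hih := ih 1 (by omega)
          simp only [loopB, if_neg ha3, ge_iff_le, ha1, if_true,
            show (0 : Int) + 1 = 1 from rfl, if_neg (show (1 : Int) ≠ 3 by norm_num)]
          rw [hih, hany, winB_cons_pos a r ha1,
            show ((3 : Int) - 0).toNat = 3 from rfl, show ((3 : Int) - 1).toNat = 2 from rfl]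
          simp only [pre, hd, Bool.true_and]
          cases r.any (fun c => c = 3) <;> cases winB r <;> cases pre 2 r <;> simp
        · have hih := ih 2 (by omega)
          simp only [loopB, if_neg ha3, ge_iff_le, ha1, if_true,
            show (1 : Int) + 1 = 2 from rfl, if_neg (show (2 : Int) ≠ 3 by norm_num)]
          rw [hih, hany, winB_cons_pos a r ha1,
            show ((3 : Int) - 1).toNat = 2 from rfl, show ((3 : Int) - 2).toNat = 1 from rfl]
          simp only [pre, hd, Bool.true_and]
          cases h2 : pre 2 r
          · cases r.any (fun c => c = 3) <;> cases winB r <;> cases pre 1 r <;> simp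
          · rw [pre_two_one r h2]; simp
        · simp only [loopB, if_neg ha3, ge_iff_le, ha1, if_true,
            show (2 : Int) + 1 = 3 from rfl]
          rw [show ((3 : Int) - 2).toNat = 1 from rfl]
          simp [pre, hd]
      · have hih := ih 0 (by omega)
        have hne : ¬ ((if a ≥ 1 then cnt + 1 else 0) = (3 : Int)) := by
          simp [ge_iff_le, ha1]
        simp only [loopB, if_neg ha3, ge_iff_le, ha1, if_false]
        rw [hih, hany, winB_cons_neg a r ha1, show ((3 : Int) - 0).toNat = 3 from rfl]
        have hpre : pre (3 - cnt).toNat (a :: r) = false := by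
          rcases hc with h | h | h <;> subst h <;> simp [pre, ha1]
        rw [hpre]
        cases h3 : pre 3 r
        · simp
        · rw [pre_three_winB r h3]; simp

-- ===== VERDICT (by name: the statement is the Claim_ definition above) =====
theorem check_babygin_spec : Claim_equal_check_babygin := by
  intro lst _
  unfold Spec_check_babygin check_babygin check_babygin_alt
  rw [zipAny_eq_winB, checkLoopA_eq_loopB, loop_char lst 0 (Or.inl rfl),
    show ((3 : Int) - 0).toNat = 3 from rfl]
  cases ha : lst.any (fun c => c = 3) <;>
    cases hw : winB lst <;> cases hp : pre 3 lst <;>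
    simp_all [pre_three_winB]
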